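-- pv_equiv track=rewrite | github.com/nazmi-abd-ghani-intel/projects | FFRCheck_Project/src/utils/helpers.py | analyze_fuse_string_bits
-- ===== SOURCE A (Python) =====
-- from typing import Optional, Dict, List, Any
--
-- def analyze_fuse_string_bits(fuse_string: str) -> Optional[Dict[str, int]]:
--     """
--     Analyze a fuse string to count different types of bits.
--
--     Args:
--         fuse_string: The fuse string to analyze
--
--     Returns:
--         Dictionary with bit counts or None if empty
--     """
--     if not fuse_string:
--         return None
--
--     register_size = len(fuse_string)
--     static_bits = sum(1 for bit in fuse_string if bit in ['0', '1'])
--     dynamic_bits = sum(1 for bit in fuse_string if bit.lower() == 'm')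
--     sort_bits = sum(1 for bit in fuse_string if bit.lower() == 's')
--
--     return {
--         'register_size': register_size,
--         'static_bits': static_bits,
--         'dynamic_bits': dynamic_bits,
--         'sort_bits': sort_bits
--     }
-- ===== SOURCE B (Python) =====
-- from collections import Counter
-- from typing import Optional, Dict
--
-- def analyze_fuse_string_bits(fuse_string: str) -> Optional[Dict[str, int]]:
--     if not fuse_string:
--         return None
--     c = Counter(fuse_string)
--     return {
--         'register_size': len(fuse_string),
--         'static_bits': c['0'] + c['1'],
--         'dynamic_bits': c['m'] + c['M'],
--         'sort_bits': c['s'] + c['S'],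
--     }
-- ===== Notes on version B (the rewrite author's own statement) =====
-- stated objective: simpler
-- what changed: Replaces three independent scans of the string (one per bit class) with a single Counter histogram built in one pass followed by O(1) lookups per class.
import Mathlib
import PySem

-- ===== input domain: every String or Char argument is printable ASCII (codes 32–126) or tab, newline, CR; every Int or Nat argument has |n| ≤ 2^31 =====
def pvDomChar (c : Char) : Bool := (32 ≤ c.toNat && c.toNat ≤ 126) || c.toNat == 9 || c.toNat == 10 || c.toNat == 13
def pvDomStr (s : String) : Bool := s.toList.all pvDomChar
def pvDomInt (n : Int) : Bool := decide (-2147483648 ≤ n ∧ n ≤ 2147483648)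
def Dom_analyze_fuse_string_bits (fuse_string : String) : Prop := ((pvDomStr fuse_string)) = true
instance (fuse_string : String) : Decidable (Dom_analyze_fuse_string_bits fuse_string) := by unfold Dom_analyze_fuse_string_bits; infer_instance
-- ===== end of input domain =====

-- B replaces A's three independent scans of the fuse string with a single Counter
-- histogram built in one pass followed by constant-time lookups (objective: simpler).


-- ===== PORT A =====
def analyze_fuse_string_bits (fuse_string : String) : Option (List (String × Int)) :=
  if fuse_string.toList = [] then none
  else
    let register_size : Int := PySem.Str.len fuse_string
    let static_bits : Int :=
      (fuse_string.toList.map (fun bit => if bit ∈ (['0', '1'] : List Char) then (1 : Int) else 0)).sum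
    let dynamic_bits : Int :=
      (fuse_string.toList.map (fun bit => if PySem.Chars.lower [bit] = ['m'] then (1 : Int) else 0)).sum
    let sort_bits : Int :=
      (fuse_string.toList.map (fun bit => if PySem.Chars.lower [bit] = ['s'] then (1 : Int) else 0)).sum
    some [("register_size", register_size), ("static_bits", static_bits),
          ("dynamic_bits", dynamic_bits), ("sort_bits", sort_bits)]

-- ===== PORT B =====
def analyze_fuse_string_bits_alt (fuse_string : String) : Option (List (String × Int)) :=
  if fuse_string.toList = [] then none
  else
    let c := PySem.Dict.counter fuse_string.toList
    some [("register_size", PySem.Str.len fuse_string),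
          ("static_bits", c.getD '0' 0 + c.getD '1' 0),
          ("dynamic_bits", c.getD 'm' 0 + c.getD 'M' 0),
          ("sort_bits", c.getD 's' 0 + c.getD 'S' 0)]

-- ===== PRECONDITION & SPEC =====
def Spec_analyze_fuse_string_bits (fuse_string : String) (out : Option (List (String × Int))) : Prop := out = analyze_fuse_string_bits_alt fuse_string
instance (fuse_string : String) (out : Option (List (String × Int))) : Decidable (Spec_analyze_fuse_string_bits fuse_string out) := by unfold Spec_analyze_fuse_string_bits; infer_instance

-- ===== CLAIM (what is proved, stated in full; the proofs are below) =====
def Claim_equal_analyze_fuse_string_bits : Prop := ∀ (fuse_string : String), Dom_analyze_fuse_string_bits fuse_string → Spec_analyze_fuse_string_bits fuse_string (analyze_fuse_string_bits fuse_string)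

-- ===== LEMMAS AND PROOFS =====

theorem char_eq_of_toNat (a b : Char) (h : a.toNat = b.toNat) : a = b := by
  cases a; cases b
  simp only [Char.toNat] at h
  congr 1
  exact UInt32.toNat_inj.mp h

theorem toNat_ofNat_valid (n : Nat) (h : Nat.isValidChar n) : (Char.ofNat n).toNat = n := by
  unfold Char.ofNat Char.toNat
  simp [Char.ofNatAux, h]

-- lowering a single character: lowerChar b equals a lowercase letter t iff b is t or its uppercase twin
theorem lowerChar_eq_lower (t : Char) (b : Char) (h1 : 97 ≤ t.toNat) (h2 : t.toNat ≤ 122) :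
    PySem.Chars.lowerChar b = t ↔ b = t ∨ b = Char.ofNat (t.toNat - 32) := by
  have htup : (Char.ofNat (t.toNat - 32)).toNat = t.toNat - 32 :=
    toNat_ofNat_valid _ (Or.inl (by omega))
  unfold PySem.Chars.lowerChar PySem.Chars.isupper
  split
  · rename_i hup
    simp only [Bool.and_eq_true, decide_eq_true_eq] at hup
    have hA : (65 : Nat) ≤ b.toNat := hup.1
    have hZ : b.toNat ≤ 90 := hup.2
    have hbt : (Char.ofNat (b.toNat + 32)).toNat = b.toNat + 32 :=
      toNat_ofNat_valid _ (Or.inl (by omega))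
    constructor
    · intro he
      have : b.toNat + 32 = t.toNat := by rw [← hbt, he]
      right; apply char_eq_of_toNat; omega
    · rintro (rfl | rfl)
      · omega
      · apply char_eq_of_toNat; omega
  · rename_i hup
    simp only [Bool.and_eq_true, decide_eq_true_eq, not_and] at hup
    constructor
    · intro he; exact Or.inl he
    · rintro (rfl | rfl)
      · rfl
      · exfalso
        have hA : ('A' : Char) ≤ Char.ofNat (t.toNat - 32) := by
          change (65 : Nat) ≤ (Char.ofNat (t.toNat - 32)).toNat
          omega
        have hZ : Char.ofNat (t.toNat - 32) ≤ ('Z' : Char) := by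
          change (Char.ofNat (t.toNat - 32)).toNat ≤ (90 : Nat)
          omega
        exact hup hA hZ

-- a 0/1-sum over a two-character predicate is the sum of the two counts
theorem sum_ite_two (p : Char → Prop) [DecidablePred p] (x y : Char) (hxy : x ≠ y)
    (hp : ∀ b, p b ↔ b = x ∨ b = y) (l : List Char) :
    (l.map (fun b => if p b then (1 : Int) else 0)).sum = l.count x + l.count y := by
  induction l with
  | nil => simp
  | cons a l ih =>
      have hcx : ((a :: l).count x : Int) = (l.count x : Int) + (if a = x then 1 else 0) := by
        by_cases h : a = x <;> simp [h]
      have hcy : ((a :: l).count y : Int) = (l.count y : Int) + (if a = y then 1 else 0) := by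
        by_cases h : a = y <;> simp [h]
      simp only [List.map_cons, List.sum_cons, ih, hcx, hcy]
      by_cases h : p a
      · rcases (hp a).1 h with rfl | rfl
        · simp [h, hxy]; ring
        · simp [h, Ne.symm hxy]; ring
      · have hx : ¬ a = x := fun e => h ((hp a).2 (Or.inl e))
        have hy : ¬ a = y := fun e => h ((hp a).2 (Or.inr e))
        simp [h, hx, hy]

theorem hp_lower (t : Char) (h1 : 97 ≤ t.toNat) (h2 : t.toNat ≤ 122) (b : Char) :
    PySem.Chars.lower [b] = [t] ↔ b = t ∨ b = Char.ofNat (t.toNat - 32) := by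
  simp only [PySem.Chars.lower, List.map, List.cons.injEq, and_true]
  exact lowerChar_eq_lower t b h1 h2

-- ===== VERDICT (by name: the statement is the Claim_ definition above) =====
theorem analyze_fuse_string_bits_spec : Claim_equal_analyze_fuse_string_bits := by
  intro s _hdom
  unfold Spec_analyze_fuse_string_bits analyze_fuse_string_bits analyze_fuse_string_bits_alt
  by_cases h : s.toList = []
  · simp [h]
  · have hst := sum_ite_two (fun b => b ∈ (['0', '1'] : List Char)) '0' '1' (by decide)
      (fun b => by simp) s.toList
    have hm := sum_ite_two (fun b => PySem.Chars.lower [b] = ['m']) 'm' 'M' (by decide)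
      (fun b => by simpa using hp_lower 'm' (by decide) (by decide) b) s.toList
    have hs := sum_ite_two (fun b => PySem.Chars.lower [b] = ['s']) 's' 'S' (by decide)
      (fun b => by simpa using hp_lower 's' (by decide) (by decide) b) s.toList
    simp only [h, if_false, PySem.Dict.getD_counter, hst, hm, hs]
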